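-- pv_equiv track=rewrite | github.com/TengFeiyang01/Algorithm | ACODE/sk_au_24/f.py | can_balance
-- ===== SOURCE A (Python) =====
-- def can_balance(n, m, a, b, friendships):
--     from collections import defaultdict, deque
--
--     graph = defaultdict(list)
--
--     # 构建图
--     for x, y in friendships:
--         graph[x - 1].append(y - 1)
--         graph[y - 1].append(x - 1)
--
--     visited = [False] * n
--     for i in range(n):
--         if not visited[i]:
--             queue = deque([i])
--             visited[i] = True
--             total_initial = 0
--             total_target = 0
--
--             while queue:
--                 node = queue.popleft()
--                 total_initial += a[node]
--                 total_target += b[node]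
--
--                 for neighbor in graph[node]:
--                     if not visited[neighbor]:
--                         visited[neighbor] = True
--                         queue.append(neighbor)
--
--             if total_initial != total_target:
--                 return "No"
--
--     return "Yes"
-- ===== SOURCE B (Python) =====
-- def can_balance(n, m, a, b, friendships):
--     parent = {}
--
--     def find(x):
--         while parent.get(x, x) != x:
--             x = parent[x]
--         return x
--
--     for x, y in friendships:
--         rx, ry = find(x - 1), find(y - 1)
--         if rx < ry:
--             parent[ry] = rx
--         elif ry < rx:
--             parent[rx] = ry
--
--     sa = {}
--     sb = {}
--     for i in range(n):
--         r = find(i)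
--         sa[r] = sa.get(r, 0) + a[i]
--         sb[r] = sb.get(r, 0) + b[i]
--
--     for r in sa:
--         if sa[r] != sb[r]:
--             return "No"
--     return "Yes"
-- ===== Notes on version B (the rewrite author's own statement) =====
-- stated objective: alternative
-- what changed: Replaces the adjacency-list + BFS-queue + visited-array component scan by a dict-based union-find (min-root union over the friendships), then groups the a- and b-sums per component root in two dicts and compares them.
-- outside the precondition, e.g. on can_balance(2, 0, [1, -2], [-2, 1], [(0, 1)]): A returns 'Yes', B returns 'No'; on can_balance(2, 1, [1, 2], [2, 1], [(0, 2)]): A returns 'No', B returns 'No'; on can_balance(2, 1, [1], [1], []): A raises IndexError, B raises IndexError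
import Mathlib
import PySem

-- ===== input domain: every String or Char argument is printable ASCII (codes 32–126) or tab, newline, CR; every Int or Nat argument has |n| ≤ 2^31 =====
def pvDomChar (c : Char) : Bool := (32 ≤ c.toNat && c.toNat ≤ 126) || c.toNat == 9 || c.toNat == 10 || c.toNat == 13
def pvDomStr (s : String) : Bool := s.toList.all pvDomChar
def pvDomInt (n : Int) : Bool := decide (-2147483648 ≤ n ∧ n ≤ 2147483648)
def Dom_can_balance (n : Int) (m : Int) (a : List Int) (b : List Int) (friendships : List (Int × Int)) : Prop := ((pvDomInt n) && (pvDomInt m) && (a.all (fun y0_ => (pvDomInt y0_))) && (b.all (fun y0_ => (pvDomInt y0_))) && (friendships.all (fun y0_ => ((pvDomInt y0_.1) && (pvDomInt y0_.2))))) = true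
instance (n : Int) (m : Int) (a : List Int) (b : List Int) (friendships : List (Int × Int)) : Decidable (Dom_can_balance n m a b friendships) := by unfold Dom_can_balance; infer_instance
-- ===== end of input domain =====

-- B replaces A's adjacency-list + BFS-queue + visited-array component scan by a union-find
-- (min-root union) and per-root sum dictionaries; proved to return the same string on Pre_.

-- ===== PORT A =====
-- graph = defaultdict(list); for x, y in friendships: graph[x-1].append(y-1); graph[y-1].append(x-1)
def pvBuildGraph (fr : List (Int × Int)) : PySem.Dict Int (List Int) :=
  fr.foldl (fun g e =>
    let g1 := g.insert (e.1 - 1) (g.getD (e.1 - 1) [] ++ [e.2 - 1])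
    g1.insert (e.2 - 1) (g1.getD (e.2 - 1) [] ++ [e.1 - 1])) PySem.Dict.empty

-- the inner 'for neighbor in graph[node]' loop (skips where Python would raise IndexError)
def pvBfsNb (st : List Bool × List Int) (nbrs : List Int) : List Bool × List Int :=
  nbrs.foldl (fun s nb =>
    match PySem.List.pyGet? s.1 nb with
    | some false => (PySem.List.pySetD s.1 nb true, s.2 ++ [nb])
    | _ => s) st

-- termination bookkeeping for the while loop: marking an unvisited node trades a False entry
-- for a queue entry, so (#False in visited) + len(queue) is invariant under the neighbor loop
theorem pvCountFlip (xs : List Bool) (i : Int) (h : PySem.List.pyGet? xs i = some false) :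
    (PySem.List.pySetD xs i true).count false + 1 = xs.count false := by
  simp only [PySem.List.pyGet?, PySem.List.pySetD, PySem.List.pySet?] at h ⊢
  cases hk : PySem.List.pyIdx? xs.length i with
  | none => simp [hk] at h
  | some k =>
    simp only [hk, Option.bind_some, Option.map_some, Option.getD_some] at h ⊢
    obtain ⟨hklt, hf⟩ := List.getElem?_eq_some_iff.mp h
    rw [List.set_eq_take_append_cons_drop, if_pos hklt]
    conv_rhs => rw [← List.take_append_drop k xs, ← List.getElem_cons_drop hklt]
    simp [List.count_append, hf]
    omega

theorem pvBfsNb_measure (nbrs : List Int) (st : List Bool × List Int) :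
    (pvBfsNb st nbrs).1.count false + (pvBfsNb st nbrs).2.length
      = st.1.count false + st.2.length := by
  induction nbrs generalizing st with
  | nil => rfl
  | cons nb t ih =>
    obtain ⟨vis, q⟩ := st
    show (pvBfsNb _ t).1.count false + (pvBfsNb _ t).2.length = _
    cases h : PySem.List.pyGet? vis nb with
    | some v =>
      cases v with
      | false =>
        rw [show (fun (s : List Bool × List Int) nb =>
              match PySem.List.pyGet? s.1 nb with
              | some false => (PySem.List.pySetD s.1 nb true, s.2 ++ [nb])
              | _ => s) (vis, q) nb
            = (PySem.List.pySetD vis nb true, q ++ [nb]) from by simp [h]]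
        rw [ih]
        have := pvCountFlip vis nb h
        simp
        omega
      | true =>
        rw [show (fun (s : List Bool × List Int) nb =>
              match PySem.List.pyGet? s.1 nb with
              | some false => (PySem.List.pySetD s.1 nb true, s.2 ++ [nb])
              | _ => s) (vis, q) nb = (vis, q) from by simp [h]]
        exact ih _
    | none =>
      rw [show (fun (s : List Bool × List Int) nb =>
            match PySem.List.pyGet? s.1 nb with
            | some false => (PySem.List.pySetD s.1 nb true, s.2 ++ [nb])
            | _ => s) (vis, q) nb = (vis, q) from by simp [h]]
      exact ih _

-- the 'while queue:' loop, accumulating the two component sums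
def pvBfs (g : PySem.Dict Int (List Int)) (a b : List Int) :
    List Bool → List Int → Int → Int → List Bool × Int × Int
  | vis, [], s1, s2 => (vis, s1, s2)
  | vis, node :: rest, s1, s2 =>
    let s1' := s1 + PySem.List.pyGetD a node 0
    let s2' := s2 + PySem.List.pyGetD b node 0
    let st := pvBfsNb (vis, rest) (g.getD node [])
    pvBfs g a b st.1 st.2 s1' s2'
termination_by vis q => vis.count false + q.length
decreasing_by
  have := pvBfsNb_measure (g.getD node []) (vis, rest)
  simp at this ⊢
  omega

-- 'for i in range(n): if not visited[i]: … BFS …; if total_initial != total_target: return "No"'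
def pvOuter (g : PySem.Dict Int (List Int)) (a b : List Int) :
    List Int → List Bool → String
  | [], _ => "Yes"
  | i :: rest, vis =>
    if PySem.List.pyGetD vis i false = true then pvOuter g a b rest vis
    else
      let vis1 := PySem.List.pySetD vis i true
      let r := pvBfs g a b vis1 [i] 0 0
      if r.2.1 ≠ r.2.2 then "No" else pvOuter g a b rest r.1

def can_balance (n : Int) (m : Int) (a : List Int) (b : List Int)
    (friendships : List (Int × Int)) : String :=
  pvOuter (pvBuildGraph friendships) a b (PySem.List.pyRange 0 n 1)
    (List.replicate n.toNat false)

-- ===== PORT B =====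
-- dict-based union-find: parent.get(x, x) treats an absent key as a root
-- 'while parent.get(x, x) != x: x = parent[x]' — fuel makes the loop total; on the forest
-- states B builds (values strictly below keys) the loop needs at most size+|x|+1 steps
def pvFindR (p : PySem.Dict Int Int) : Nat → Int → Int
  | 0, x => x
  | f + 1, x =>
    let px := p.getD x x
    if px = x then x else pvFindR p f px

def pvFind (p : PySem.Dict Int Int) (x : Int) : Int := pvFindR p (p.size + x.toNat + 1) x

-- one union step: link the larger root below the smaller
def pvUnion (p : PySem.Dict Int Int) (e : Int × Int) : PySem.Dict Int Int :=
  let rx := pvFind p (e.1 - 1)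
  let ry := pvFind p (e.2 - 1)
  if rx < ry then p.insert ry rx
  else if ry < rx then p.insert rx ry
  else p

-- 'for r in sa: if sa[r] != sb[r]: return "No"'
def pvCheck (sa sb : PySem.Dict Int Int) : List Int → String
  | [] => "Yes"
  | k :: rest => if sa.getD k 0 ≠ sb.getD k 0 then "No" else pvCheck sa sb rest

def can_balance_alt (n : Int) (m : Int) (a : List Int) (b : List Int)
    (friendships : List (Int × Int)) : String :=
  let p := friendships.foldl pvUnion PySem.Dict.empty
  let s := (PySem.List.pyRange 0 n 1).foldl (fun s i =>
      let r := pvFind p i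
      (s.1.insert r (s.1.getD r 0 + PySem.List.pyGetD a i 0),
       s.2.insert r (s.2.getD r 0 + PySem.List.pyGetD b i 0)))
    (PySem.Dict.empty, PySem.Dict.empty)
  pvCheck s.1 s.2 s.1.keys

-- ===== PRECONDITION & SPEC =====
-- Pre_ restricts to the task's natural domain: a and b hold the n balances and (when n > 0)
-- every friendship either joins two 1-based members or references only ids beyond n (such
-- edges never touch members 1..n in either program); outside it A raises IndexError, except
-- for edges with an endpoint in [1-n, 0], where A returns via Python's accidental
-- negative-index wraparound (excluded too).
def Pre_can_balance (n : Int) (m : Int) (a : List Int) (b : List Int)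
    (friendships : List (Int × Int)) : Prop :=
  n.toNat ≤ a.length ∧ n.toNat ≤ b.length ∧
    (n ≤ 0 ∨ ∀ e ∈ friendships,
      (1 ≤ e.1 ∧ e.1 ≤ n ∧ 1 ≤ e.2 ∧ e.2 ≤ n) ∨ (n < e.1 ∧ n < e.2))
instance (n : Int) (m : Int) (a : List Int) (b : List Int) (friendships : List (Int × Int)) :
    Decidable (Pre_can_balance n m a b friendships) := by unfold Pre_can_balance; infer_instance

def pvWitness_can_balance : Int × Int × List Int × List Int × (List (Int × Int)) :=
  (3, 2, [1, 2, 3], [2, 1, 3], [(1, 2)])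

def Spec_can_balance (n : Int) (m : Int) (a : List Int) (b : List Int)
    (friendships : List (Int × Int)) (out : String) : Prop :=
  out = can_balance_alt n m a b friendships
instance (n : Int) (m : Int) (a : List Int) (b : List Int) (friendships : List (Int × Int))
    (out : String) : Decidable (Spec_can_balance n m a b friendships out) := by
  unfold Spec_can_balance; infer_instance

-- ===== CLAIM (what is proved, stated in full; the proofs are below) =====
def Claim_equal_can_balance : Prop := ∀ (n : Int) (m : Int) (a : List Int) (b : List Int) (friendships : List (Int × Int)), Dom_can_balance n m a b friendships → Pre_can_balance n m a b friendships → Spec_can_balance n m a b friendships (can_balance n m a b friendships)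

-- ===== LEMMAS AND PROOFS =====


-- ---------- shared semantic layer: adjacency / connectivity over 0-based nodes ----------

def pvAdj (fr : List (Int × Int)) (u v : Nat) : Prop :=
  ∃ e ∈ fr, ((e.1 - 1).toNat = u ∧ (e.2 - 1).toNat = v) ∨ ((e.1 - 1).toNat = v ∧ (e.2 - 1).toNat = u)

def pvConn (fr : List (Int × Int)) : Nat → Nat → Prop := Relation.ReflTransGen (pvAdj fr)

def pvGE (n : Int) (fr : List (Int × Int)) : Prop :=
  ∀ e ∈ fr, (1 ≤ e.1 ∧ e.1 ≤ n ∧ 1 ≤ e.2 ∧ e.2 ≤ n) ∨ (n < e.1 ∧ n < e.2)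

theorem pvAdj_symm (fr : List (Int × Int)) (u v : Nat) (h : pvAdj fr u v) : pvAdj fr v u := by
  obtain ⟨e, he, h⟩ := h; exact ⟨e, he, h.symm⟩

theorem pvConn_symm (fr : List (Int × Int)) (u v : Nat) (h : pvConn fr u v) : pvConn fr v u :=
  Relation.ReflTransGen.symmetric (fun _ _ hh => pvAdj_symm fr _ _ hh) h

theorem pvAdj_lt (n : Int) (fr : List (Int × Int)) (hge : pvGE n fr) (u v : Nat)
    (h : pvAdj fr u v) : (u < n.toNat ∧ v < n.toNat) ∨ (n.toNat ≤ u ∧ n.toNat ≤ v) := by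
  obtain ⟨e, he, h⟩ := h
  rcases hge e he with he2 | he2 <;>
    rcases h with ⟨h1, h2⟩ | ⟨h1, h2⟩ <;> [left; left; right; right] <;> omega

theorem pvAdj_lt_low (n : Int) (fr : List (Int × Int)) (hge : pvGE n fr) (u v : Nat)
    (hu : u < n.toNat) (h : pvAdj fr u v) : v < n.toNat := by
  rcases pvAdj_lt n fr hge u v h with h2 | h2 <;> omega

theorem pvConn_stay (n : Int) (fr : List (Int × Int)) (hge : pvGE n fr) (i j : Nat)
    (hi : i < n.toNat) (hc : pvConn fr i j) : j < n.toNat := by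
  induction hc with
  | refl => exact hi
  | tail _ hadj ihh => exact pvAdj_lt_low n fr hge _ _ ihh hadj

-- ---------- union-find forest invariants ----------

def pvInv (N : Nat) (p : PySem.Dict Int Int) : Prop :=
  ∀ j : Nat, j < N → 0 ≤ p.getD (j : Int) (j : Int) ∧ p.getD (j : Int) (j : Int) ≤ (j : Int)

theorem pvFindR_fuel (N : Nat) (p : PySem.Dict Int Int) (hp : pvInv N p) (x : Nat) (hx : x < N) :
    ∀ f₁ f₂ : Nat, x < f₁ → x < f₂ → pvFindR p f₁ (x : Int) = pvFindR p f₂ (x : Int) := by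
  induction x using Nat.strong_induction_on with
  | _ x ih =>
    intro f₁ f₂ h1 h2
    obtain ⟨g₁, rfl⟩ : ∃ g, f₁ = g + 1 := ⟨f₁ - 1, by omega⟩
    obtain ⟨g₂, rfl⟩ : ∃ g, f₂ = g + 1 := ⟨f₂ - 1, by omega⟩
    show (if p.getD (x : Int) (x : Int) = (x : Int) then (x : Int)
          else pvFindR p g₁ (p.getD (x : Int) (x : Int)))
       = (if p.getD (x : Int) (x : Int) = (x : Int) then (x : Int)
          else pvFindR p g₂ (p.getD (x : Int) (x : Int)))
    by_cases hroot : p.getD (x : Int) (x : Int) = (x : Int)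
    · rw [if_pos hroot, if_pos hroot]
    · rw [if_neg hroot, if_neg hroot]
      have hb := hp x hx
      set k := (p.getD (x : Int) (x : Int)).toNat with hk
      have hcast : p.getD (x : Int) (x : Int) = (k : Int) := by omega
      have hklt : k < x := by omega
      rw [hcast]
      exact ih k hklt (by omega) g₁ g₂ (by omega) (by omega)

theorem pvFind_eq (N : Nat) (p : PySem.Dict Int Int) (hp : pvInv N p) (x : Nat) (hx : x < N) :
    pvFind p (x : Int)
      = if p.getD (x : Int) (x : Int) = (x : Int) then (x : Int)
        else pvFind p (p.getD (x : Int) (x : Int)) := by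
  show pvFindR p (p.size + ((x : Int)).toNat + 1) (x : Int) = _
  rw [Int.toNat_natCast]
  show (if p.getD (x : Int) (x : Int) = (x : Int) then (x : Int)
        else pvFindR p (p.size + x) (p.getD (x : Int) (x : Int))) = _
  by_cases hroot : p.getD (x : Int) (x : Int) = (x : Int)
  · rw [if_pos hroot, if_pos hroot]
  · rw [if_neg hroot, if_neg hroot]
    have hb := hp x hx
    set k := (p.getD (x : Int) (x : Int)).toNat with hk
    have hcast : p.getD (x : Int) (x : Int) = (k : Int) := by omega
    rw [hcast]
    show pvFindR p (p.size + x) (k : Int) = pvFindR p (p.size + ((k : Int)).toNat + 1) (k : Int)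
    rw [Int.toNat_natCast]
    exact pvFindR_fuel N p hp k (by omega) (p.size + x) (p.size + k + 1) (by omega) (by omega)

theorem pvFind_root (N : Nat) (p : PySem.Dict Int Int) (hp : pvInv N p) (x : Nat) (hx : x < N) :
    ∃ r : Nat, pvFind p (x : Int) = (r : Int) ∧ r ≤ x ∧ p.getD (r : Int) (r : Int) = (r : Int) := by
  induction x using Nat.strong_induction_on with
  | _ x ih =>
    rw [pvFind_eq N p hp x hx]
    by_cases hroot : p.getD (x : Int) (x : Int) = (x : Int)
    · exact ⟨x, by rw [if_pos hroot], le_refl _, hroot⟩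
    · rw [if_neg hroot]
      have hb := hp x hx
      have hcast : p.getD (x : Int) (x : Int)
          = (((p.getD (x : Int) (x : Int)).toNat : Nat) : Int) := by omega
      rw [hcast]
      obtain ⟨r, h1, h2, h3⟩ := ih (p.getD (x : Int) (x : Int)).toNat (by omega) (by omega)
      exact ⟨r, h1, by omega, h3⟩

theorem pvFind_of_root (N : Nat) (p : PySem.Dict Int Int) (hp : pvInv N p) (r : Nat) (hr : r < N)
    (hroot : p.getD (r : Int) (r : Int) = (r : Int)) : pvFind p (r : Int) = (r : Int) := by
  rw [pvFind_eq N p hp r hr, if_pos hroot]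

-- relinking root r2 under root r1 redirects exactly the class of r2
theorem pvRelink (N : Nat) (p : PySem.Dict Int Int) (hp : pvInv N p) (r1 r2 : Nat)
    (h12 : r1 < r2) (h2 : r2 < N)
    (hroot1 : p.getD (r1 : Int) (r1 : Int) = (r1 : Int))
    (hroot2 : p.getD (r2 : Int) (r2 : Int) = (r2 : Int)) :
    pvInv N (p.insert (r2 : Int) (r1 : Int)) ∧
    ∀ x : Nat, x < N →
      pvFind (p.insert (r2 : Int) (r1 : Int)) (x : Int)
        = if pvFind p (x : Int) = (r2 : Int) then (r1 : Int) else pvFind p (x : Int) := by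
  have hgd : ∀ j : Nat, j < N →
      (p.insert (r2 : Int) (r1 : Int)).getD (j : Int) (j : Int)
        = if j = r2 then (r1 : Int) else p.getD (j : Int) (j : Int) := by
    intro j hj
    rw [PySem.Dict.getD_insert]
    by_cases hjr : j = r2
    · rw [if_pos (by exact_mod_cast congrArg (Nat.cast : Nat → Int) hjr), if_pos hjr]
    · rw [if_neg (by exact_mod_cast fun h => hjr (by exact_mod_cast h)), if_neg hjr]
  have hinv : pvInv N (p.insert (r2 : Int) (r1 : Int)) := by
    intro j hj
    rw [hgd j hj]
    by_cases hjr : j = r2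
    · rw [if_pos hjr]; omega
    · rw [if_neg hjr]; exact hp j hj
  refine ⟨hinv, ?_⟩
  intro x
  induction x using Nat.strong_induction_on with
  | _ x ih =>
    intro hx
    rw [pvFind_eq N _ hinv x hx, hgd x hx]
    by_cases hxr : x = r2
    · subst hxr
      rw [if_pos rfl, if_neg (by omega)]
      rw [pvFind_of_root N p hp x hx hroot2, if_pos rfl]
      rw [pvFind_of_root N _ hinv r1 (by omega)
        (by rw [hgd r1 (by omega), if_neg (by omega)]; exact hroot1)]
    · rw [if_neg hxr]
      by_cases hroot : p.getD (x : Int) (x : Int) = (x : Int)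
      · rw [if_pos hroot]
        rw [pvFind_of_root N p hp x hx hroot]
        rw [if_neg (by exact_mod_cast fun h => hxr (by exact_mod_cast h))]
      · rw [if_neg hroot]
        have hb := hp x hx
        have hcast : p.getD (x : Int) (x : Int)
            = (((p.getD (x : Int) (x : Int)).toNat : Nat) : Int) := by omega
        rw [hcast]
        rw [ih (p.getD (x : Int) (x : Int)).toNat (by omega) (by omega)]
        rw [pvFind_eq N p hp x hx, if_neg hroot, hcast]
        simp

-- chains on ids beyond n (reached only through out-of-range edges) stay beyond n
def pvInvH (n : Int) (p : PySem.Dict Int Int) : Prop :=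
  ∀ x : Int, n ≤ x → n ≤ p.getD x x ∧ p.getD x x ≤ x

theorem pvFindR_fuelH (n : Int) (p : PySem.Dict Int Int) (hpH : pvInvH n p) (hn : 0 < n) :
    ∀ k : Nat, ∀ x : Int, x.toNat ≤ k → n ≤ x →
      ∀ f₁ f₂ : Nat, x.toNat < f₁ → x.toNat < f₂ → pvFindR p f₁ x = pvFindR p f₂ x := by
  intro k
  induction k with
  | zero =>
    intro x hxk hx f₁ f₂ h1 h2
    omega
  | succ k ih =>
    intro x hxk hx f₁ f₂ h1 h2
    obtain ⟨g₁, rfl⟩ : ∃ g, f₁ = g + 1 := ⟨f₁ - 1, by omega⟩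
    obtain ⟨g₂, rfl⟩ : ∃ g, f₂ = g + 1 := ⟨f₂ - 1, by omega⟩
    show (if p.getD x x = x then x else pvFindR p g₁ (p.getD x x))
       = (if p.getD x x = x then x else pvFindR p g₂ (p.getD x x))
    by_cases hroot : p.getD x x = x
    · rw [if_pos hroot, if_pos hroot]
    · rw [if_neg hroot, if_neg hroot]
      have hb := hpH x hx
      exact ih (p.getD x x) (by omega) (by omega) g₁ g₂ (by omega) (by omega)

theorem pvFind_eqH (n : Int) (p : PySem.Dict Int Int) (hpH : pvInvH n p) (hn : 0 < n)
    (x : Int) (hx : n ≤ x) :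
    pvFind p x = if p.getD x x = x then x else pvFind p (p.getD x x) := by
  show pvFindR p (p.size + x.toNat + 1) x = _
  show (if p.getD x x = x then x else pvFindR p (p.size + x.toNat) (p.getD x x)) = _
  by_cases hroot : p.getD x x = x
  · rw [if_pos hroot, if_pos hroot]
  · rw [if_neg hroot, if_neg hroot]
    have hb := hpH x hx
    exact pvFindR_fuelH n p hpH hn (p.getD x x).toNat (p.getD x x) (le_refl _) (by omega)
      (p.size + x.toNat) (p.size + (p.getD x x).toNat + 1) (by omega) (by omega)

theorem pvFind_rootH (n : Int) (p : PySem.Dict Int Int) (hpH : pvInvH n p) (hn : 0 < n) :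
    ∀ k : Nat, ∀ x : Int, x.toNat ≤ k → n ≤ x →
      ∃ r : Int, pvFind p x = r ∧ n ≤ r ∧ r ≤ x ∧ p.getD r r = r := by
  intro k
  induction k with
  | zero =>
    intro x hxk hx
    omega
  | succ k ih =>
    intro x hxk hx
    rw [pvFind_eqH n p hpH hn x hx]
    by_cases hroot : p.getD x x = x
    · exact ⟨x, by rw [if_pos hroot], hx, le_refl _, hroot⟩
    · rw [if_neg hroot]
      have hb := hpH x hx
      obtain ⟨r, h1, h2, h3, h4⟩ := ih (p.getD x x) (by omega) (by omega)
      exact ⟨r, h1, h2, by omega, h4⟩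

-- find on members below n only reads entries below n
theorem pvLowUnchanged (N : Nat) (p p' : PySem.Dict Int Int)
    (hp : pvInv N p) (hp' : pvInv N p')
    (h : ∀ j : Nat, j < N → p'.getD (j : Int) (j : Int) = p.getD (j : Int) (j : Int)) :
    ∀ i : Nat, i < N → pvFind p' (i : Int) = pvFind p (i : Int) := by
  intro i
  induction i using Nat.strong_induction_on with
  | _ i ih =>
    intro hi
    rw [pvFind_eq N p' hp' i hi, pvFind_eq N p hp i hi, h i hi]
    by_cases hroot : p.getD (i : Int) (i : Int) = (i : Int)
    · rw [if_pos hroot, if_pos hroot]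
    · rw [if_neg hroot, if_neg hroot]
      have hb := hp i hi
      have hcast : p.getD (i : Int) (i : Int)
          = (((p.getD (i : Int) (i : Int)).toNat : Nat) : Int) := by omega
      rw [hcast]
      exact ih (p.getD (i : Int) (i : Int)).toNat (by omega) (by omega)

-- an in-range union never inserts a key at or beyond n
theorem pvUnionLow_InvH (n : Int) (N : Nat) (hN : N = n.toNat) (p : PySem.Dict Int Int)
    (hp : pvInv N p) (hpH : pvInvH n p)
    (e : Int × Int) (he : 1 ≤ e.1 ∧ e.1 ≤ n ∧ 1 ≤ e.2 ∧ e.2 ≤ n) :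
    pvInvH n (pvUnion p e) := by
  have hu : e.1 - 1 = (((e.1 - 1).toNat : Nat) : Int) := by omega
  have hv : e.2 - 1 = (((e.2 - 1).toNat : Nat) : Int) := by omega
  have hun : (e.1 - 1).toNat < N := by omega
  have hvn : (e.2 - 1).toNat < N := by omega
  obtain ⟨ru, hru, hru2, hru3⟩ := pvFind_root N p hp (e.1 - 1).toNat hun
  obtain ⟨rv, hrv, hrv2, hrv3⟩ := pvFind_root N p hp (e.2 - 1).toNat hvn
  have hunion : pvUnion p e =
      (if pvFind p (e.1 - 1) < pvFind p (e.2 - 1) then p.insert (pvFind p (e.2 - 1)) (pvFind p (e.1 - 1))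
       else if pvFind p (e.2 - 1) < pvFind p (e.1 - 1) then p.insert (pvFind p (e.1 - 1)) (pvFind p (e.2 - 1))
       else p) := rfl
  rw [hunion, hu, hv, hru, hrv]
  intro x hx
  split_ifs with h1 h2
  · rw [PySem.Dict.getD_insert, if_neg (by omega)]
    exact hpH x hx
  · rw [PySem.Dict.getD_insert, if_neg (by omega)]
    exact hpH x hx
  · exact hpH x hx

-- a union of an out-of-range edge changes nothing below n
theorem pvUnionHigh (n : Int) (N : Nat) (hN : N = n.toNat) (hn : 0 < n)
    (p : PySem.Dict Int Int) (hp : pvInv N p) (hpH : pvInvH n p)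
    (e : Int × Int) (he : n < e.1 ∧ n < e.2) :
    pvInv N (pvUnion p e) ∧ pvInvH n (pvUnion p e) ∧
    ∀ i : Nat, i < N → pvFind (pvUnion p e) (i : Int) = pvFind p (i : Int) := by
  obtain ⟨r1, hr1, hr1n, hr1le, hr1root⟩ :=
    pvFind_rootH n p hpH hn (e.1 - 1).toNat (e.1 - 1) (le_refl _) (by omega)
  obtain ⟨r2, hr2, hr2n, hr2le, hr2root⟩ :=
    pvFind_rootH n p hpH hn (e.2 - 1).toNat (e.2 - 1) (le_refl _) (by omega)
  have hunion : pvUnion p e =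
      (if pvFind p (e.1 - 1) < pvFind p (e.2 - 1) then p.insert (pvFind p (e.2 - 1)) (pvFind p (e.1 - 1))
       else if pvFind p (e.2 - 1) < pvFind p (e.1 - 1) then p.insert (pvFind p (e.1 - 1)) (pvFind p (e.2 - 1))
       else p) := rfl
  rw [hunion, hr1, hr2]
  have hcase : ∀ (k v : Int), n ≤ k → n ≤ v → v ≤ k →
      pvInv N (p.insert k v) ∧ pvInvH n (p.insert k v) ∧
      ∀ i : Nat, i < N → pvFind (p.insert k v) (i : Int) = pvFind p (i : Int) := by
    intro k v hk hv hvk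
    have hlow : ∀ j : Nat, j < N →
        (p.insert k v).getD (j : Int) (j : Int) = p.getD (j : Int) (j : Int) := by
      intro j hj
      rw [PySem.Dict.getD_insert, if_neg (by omega)]
    have hinv : pvInv N (p.insert k v) := by
      intro j hj
      rw [hlow j hj]
      exact hp j hj
    refine ⟨hinv, ?_, pvLowUnchanged N p (p.insert k v) hp hinv hlow⟩
    intro x hx
    rw [PySem.Dict.getD_insert]
    by_cases hxk : x = k
    · rw [if_pos hxk]
      omega
    · rw [if_neg hxk]
      exact hpH x hx
  split_ifs with h1 h2
  · exact hcase r2 r1 hr2n hr1n (by omega)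
  · exact hcase r1 r2 hr1n hr2n (by omega)
  · exact ⟨hp, hpH, fun i _ => rfl⟩

-- one union step merges exactly the classes of the two endpoints
theorem pvUnion_spec (n : Int) (N : Nat) (hN : N = n.toNat) (p : PySem.Dict Int Int)
    (hp : pvInv N p)
    (e : Int × Int) (he : 1 ≤ e.1 ∧ e.1 ≤ n ∧ 1 ≤ e.2 ∧ e.2 ≤ n) :
    pvInv N (pvUnion p e) ∧
    ∀ i j : Nat, i < N → j < N →
      (pvFind (pvUnion p e) (i : Int) = pvFind (pvUnion p e) (j : Int) ↔
        (pvFind p (i : Int) = pvFind p (j : Int) ∨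
         (pvFind p (i : Int) = pvFind p ((e.1 - 1).toNat : Int) ∧
          pvFind p ((e.2 - 1).toNat : Int) = pvFind p (j : Int)) ∨
         (pvFind p (i : Int) = pvFind p ((e.2 - 1).toNat : Int) ∧
          pvFind p ((e.1 - 1).toNat : Int) = pvFind p (j : Int)))) := by
  have hu : e.1 - 1 = (((e.1 - 1).toNat : Nat) : Int) := by omega
  have hv : e.2 - 1 = (((e.2 - 1).toNat : Nat) : Int) := by omega
  set u : Nat := (e.1 - 1).toNat with hudef
  set v : Nat := (e.2 - 1).toNat with hvdef
  have hun : u < N := by omega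
  have hvn : v < N := by omega
  obtain ⟨ru, hru, hru2, hru3⟩ := pvFind_root N p hp u hun
  obtain ⟨rv, hrv, hrv2, hrv3⟩ := pvFind_root N p hp v hvn
  have hunion : pvUnion p e =
      (if pvFind p (u : Int) < pvFind p (v : Int) then p.insert (pvFind p (v : Int)) (pvFind p (u : Int))
       else if pvFind p (v : Int) < pvFind p (u : Int) then p.insert (pvFind p (u : Int)) (pvFind p (v : Int))
       else p) := by
    rw [pvUnion]
    rw [hu, hv]
  by_cases hlt : pvFind p (u : Int) < pvFind p (v : Int)
  · have hrur : ru < rv := by omega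
    obtain ⟨hinv, hclass⟩ := pvRelink N p hp ru rv hrur (by omega) hru3 hrv3
    rw [hunion, if_pos hlt, hru, hrv] at *
    refine ⟨hinv, ?_⟩
    intro i j hi hj
    rw [hclass i hi, hclass j hj, hru, hrv]
    obtain ⟨ri, hri, _, hri3⟩ := pvFind_root N p hp i hi
    obtain ⟨rj, hrj, _, hrj3⟩ := pvFind_root N p hp j hj
    rw [hri, hrj]
    constructor
    · intro h
      split_ifs at h <;> omega
    · intro h
      rcases h with h | ⟨h1, h2⟩ | ⟨h1, h2⟩ <;> split_ifs <;> omega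
  · by_cases hlt2 : pvFind p (v : Int) < pvFind p (u : Int)
    · have hrvr : rv < ru := by omega
      obtain ⟨hinv, hclass⟩ := pvRelink N p hp rv ru hrvr (by omega) hrv3 hru3
      rw [hunion, if_neg hlt, if_pos hlt2, hru, hrv] at *
      refine ⟨hinv, ?_⟩
      intro i j hi hj
      rw [hclass i hi, hclass j hj, hru, hrv]
      obtain ⟨ri, hri, _, hri3⟩ := pvFind_root N p hp i hi
      obtain ⟨rj, hrj, _, hrj3⟩ := pvFind_root N p hp j hj
      rw [hri, hrj]
      constructor
      · intro h
        split_ifs at h <;> omega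
      · intro h
        rcases h with h | ⟨h1, h2⟩ | ⟨h1, h2⟩ <;> split_ifs <;> omega
    · have heq : pvFind p (u : Int) = pvFind p (v : Int) := by omega
      rw [hunion, if_neg hlt, if_neg hlt2]
      refine ⟨hp, ?_⟩
      intro i j hi hj
      constructor
      · intro h; exact Or.inl h
      · intro h
        rcases h with h | ⟨h1, h2⟩ | ⟨h1, h2⟩
        · exact h
        · rw [h1, heq, h2]
        · rw [h1, ← heq, h2]

-- adding one edge to the graph joins the two reachability classes
theorem pvConn_append (fr : List (Int × Int)) (e : Int × Int) (i j : Nat) :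
    pvConn (fr ++ [e]) i j ↔
      (pvConn fr i j ∨
       (pvConn fr i (e.1 - 1).toNat ∧ pvConn fr (e.2 - 1).toNat j) ∨
       (pvConn fr i (e.2 - 1).toNat ∧ pvConn fr (e.1 - 1).toNat j)) := by
  have hmono : ∀ x y : Nat, pvConn fr x y → pvConn (fr ++ [e]) x y := by
    intro x y h
    exact Relation.ReflTransGen.mono
      (fun u v ⟨e', he', hc⟩ => ⟨e', List.mem_append_left _ he', hc⟩) h
  have hedge : pvAdj (fr ++ [e]) (e.1 - 1).toNat (e.2 - 1).toNat :=
    ⟨e, List.mem_append_right _ (by simp), Or.inl ⟨rfl, rfl⟩⟩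
  constructor
  · intro h
    induction h with
    | refl => exact Or.inl Relation.ReflTransGen.refl
    | @tail k j hik hadj ih =>
      obtain ⟨e', he', hcase⟩ := hadj
      rcases List.mem_append.mp he' with he'f | he'e
      · rcases ih with h | ⟨h1, h2⟩ | ⟨h1, h2⟩
        · exact Or.inl (h.tail ⟨e', he'f, hcase⟩)
        · exact Or.inr (Or.inl ⟨h1, h2.tail ⟨e', he'f, hcase⟩⟩)
        · exact Or.inr (Or.inr ⟨h1, h2.tail ⟨e', he'f, hcase⟩⟩)
      · have hee : e' = e := by simpa using he'e
        subst hee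
        rcases hcase with ⟨hk, hj⟩ | ⟨hk, hj⟩
        · subst hk; subst hj
          rcases ih with h | ⟨h1, h2⟩ | ⟨h1, h2⟩
          · exact Or.inr (Or.inl ⟨h, Relation.ReflTransGen.refl⟩)
          · exact Or.inr (Or.inl ⟨h1, Relation.ReflTransGen.refl⟩)
          · exact Or.inl h1
        · subst hk; subst hj
          rcases ih with h | ⟨h1, h2⟩ | ⟨h1, h2⟩
          · exact Or.inr (Or.inr ⟨h, Relation.ReflTransGen.refl⟩)
          · exact Or.inl h1
          · exact Or.inr (Or.inr ⟨h1, Relation.ReflTransGen.refl⟩)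
  · intro h
    rcases h with h | ⟨h1, h2⟩ | ⟨h1, h2⟩
    · exact hmono _ _ h
    · exact Relation.ReflTransGen.trans ((hmono _ _ h1).tail hedge) (hmono _ _ h2)
    · exact Relation.ReflTransGen.trans
        ((hmono _ _ h1).tail (pvAdj_symm _ _ _ hedge)) (hmono _ _ h2)

-- the DSU after all unions realises exactly graph connectivity
theorem pvDsu_main (n : Int) (fr : List (Int × Int)) (hge : pvGE n fr) (hn : 0 < n) :
    pvInv n.toNat (fr.foldl pvUnion PySem.Dict.empty) ∧
    pvInvH n (fr.foldl pvUnion PySem.Dict.empty) ∧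
    ∀ i j : Nat, i < n.toNat → j < n.toNat →
      (pvFind (fr.foldl pvUnion PySem.Dict.empty) (i : Int)
        = pvFind (fr.foldl pvUnion PySem.Dict.empty) (j : Int) ↔ pvConn fr i j) := by
  induction fr using List.reverseRecOn with
  | nil =>
    have hinv : pvInv n.toNat (PySem.Dict.empty (κ := Int) (ν := Int)) := by
      intro j hj
      rw [PySem.Dict.getD_empty]
      omega
    refine ⟨hinv, ?_, ?_⟩
    · intro x hx
      simp only [List.foldl_nil, PySem.Dict.getD_empty]
      omega
    intro i j hi hj
    simp only [List.foldl_nil]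
    rw [pvFind_of_root n.toNat _ hinv i hi (PySem.Dict.getD_empty ..),
      pvFind_of_root n.toNat _ hinv j hj (PySem.Dict.getD_empty ..)]
    constructor
    · intro h
      have : i = j := by exact_mod_cast h
      exact this ▸ Relation.ReflTransGen.refl
    · intro h
      induction h with
      | refl => rfl
      | tail _ hadj _ => exact absurd hadj (by simp [pvAdj])
  | append_singleton fr e ih =>
    have hgefr : pvGE n fr := fun e' he' => hge e' (List.mem_append_left _ he')
    have hee := hge e (List.mem_append_right _ (by simp))
    obtain ⟨hinv, hinvH, hiff⟩ := ih hgefr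
    rw [List.foldl_append, List.foldl_cons, List.foldl_nil]
    rcases hee with hee | hee
    · obtain ⟨hinv', hclass⟩ := pvUnion_spec n n.toNat rfl _ hinv e hee
      refine ⟨hinv', pvUnionLow_InvH n n.toNat rfl _ hinv hinvH e hee, ?_⟩
      intro i j hi hj
      rw [hclass i j hi hj, pvConn_append fr e i j]
      have hun : (e.1 - 1).toNat < n.toNat := by omega
      have hvn : (e.2 - 1).toNat < n.toNat := by omega
      rw [hiff i j hi hj, hiff i (e.1 - 1).toNat hi hun, hiff ((e.2 - 1).toNat) j hvn hj,
        hiff i (e.2 - 1).toNat hi hvn, hiff ((e.1 - 1).toNat) j hun hj]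
    · obtain ⟨hinv', hinvH', hfix⟩ := pvUnionHigh n n.toNat rfl hn _ hinv hinvH e hee
      refine ⟨hinv', hinvH', ?_⟩
      intro i j hi hj
      rw [hfix i hi, hfix j hj, hiff i j hi hj, pvConn_append fr e i j]
      have huN : n.toNat ≤ (e.1 - 1).toNat := by omega
      have hvN : n.toNat ≤ (e.2 - 1).toNat := by omega
      constructor
      · exact fun h => Or.inl h
      · rintro (h | ⟨h1, h2⟩ | ⟨h1, h2⟩)
        · exact h
        · exact absurd (pvConn_stay n fr hgefr i _ hi h1) (by omega)
        · exact absurd (pvConn_stay n fr hgefr i _ hi h1) (by omega)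

-- ---------- B-side characterisation: per-root grouped sums ----------

def pvP (n : Int) (fr : List (Int × Int)) : PySem.Dict Int Int :=
  fr.foldl pvUnion PySem.Dict.empty

def pvSumC (n : Int) (fr : List (Int × Int)) (c : List Int) (r : Int) : Int :=
  (((List.range n.toNat).filter (fun (j : Nat) => pvFind (pvP n fr) (j : Int) == r)).map
    (fun (j : Nat) => c.getD j 0)).sum

def pvBad (n : Int) (fr : List (Int × Int)) (a b : List Int) (j : Nat) : Prop :=
  pvSumC n fr a (pvFind (pvP n fr) (j : Int)) ≠ pvSumC n fr b (pvFind (pvP n fr) (j : Int))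

def pvSA (n : Int) (fr : List (Int × Int)) (c : List Int) : PySem.Dict Int Int :=
  (List.range n.toNat).foldl
    (fun d (j : Nat) => d.insert (pvFind (pvP n fr) (j : Int))
      (d.getD (pvFind (pvP n fr) (j : Int)) 0 + c.getD j 0)) PySem.Dict.empty

theorem pvGroupSum {α : Type} (l : List α) (k : α → Int) (w : α → Int)
    (d : PySem.Dict Int Int) (r : Int) :
    (l.foldl (fun d i => d.insert (k i) (d.getD (k i) 0 + w i)) d).getD r 0
      = d.getD r 0 + ((l.filter (fun i => k i == r)).map w).sum := by
  induction l generalizing d with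
  | nil => simp
  | cons h t ih =>
    rw [List.foldl_cons, ih, PySem.Dict.getD_insert, List.filter_cons]
    by_cases hk : r = k h
    · rw [if_pos hk, if_pos (by simp [hk])]
      simp only [List.map_cons, List.sum_cons, hk]
      ring
    · rw [if_neg hk, if_neg (by simp only [beq_iff_eq]; exact fun hh => hk hh.symm)]

theorem pvCheck_no (sa sb : PySem.Dict Int Int) (ks : List Int) :
    (pvCheck sa sb ks = "No" ↔ ∃ k ∈ ks, sa.getD k 0 ≠ sb.getD k 0) ∧
    (pvCheck sa sb ks = "Yes" ∨ pvCheck sa sb ks = "No") := by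
  induction ks with
  | nil => simp [pvCheck]
  | cons h t ih =>
    rw [pvCheck]
    by_cases hh : sa.getD h 0 ≠ sb.getD h 0
    · rw [if_pos hh]
      exact ⟨by simp [hh], Or.inr rfl⟩
    · rw [if_neg hh]
      refine ⟨?_, ih.2⟩
      rw [ih.1]
      simp only [List.mem_cons]
      constructor
      · rintro ⟨k, hk, hne⟩; exact ⟨k, Or.inr hk, hne⟩
      · rintro ⟨k, hk | hk, hne⟩
        · exact absurd (hk ▸ hne) hh
        · exact ⟨k, hk, hne⟩

theorem pvFold_eq (n : Int) (a b : List Int) (fr : List (Int × Int)) :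
    (PySem.List.pyRange 0 n 1).foldl (fun s i =>
      (s.1.insert (pvFind (fr.foldl pvUnion PySem.Dict.empty) i)
        (s.1.getD (pvFind (fr.foldl pvUnion PySem.Dict.empty) i) 0
          + PySem.List.pyGetD a i 0),
       s.2.insert (pvFind (fr.foldl pvUnion PySem.Dict.empty) i)
        (s.2.getD (pvFind (fr.foldl pvUnion PySem.Dict.empty) i) 0
          + PySem.List.pyGetD b i 0)))
      (PySem.Dict.empty, PySem.Dict.empty) = (pvSA n fr a, pvSA n fr b) := by
  rw [show fr.foldl pvUnion PySem.Dict.empty = pvP n fr from rfl]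
  conv_lhs => rw [show PySem.List.pyRange 0 n 1
    = (List.range n.toNat).map (fun (k : Nat) => (k : Int)) from PySem.List.pyRange_zero n]
  rw [List.foldl_map]
  simp only [pvSA, ← PySem.List.pyGetD_natCast]
  exact PySem.List.foldl_prod_mk
    (fun d (j : Nat) =>
      d.insert (pvFind (pvP n fr) (j : Int))
        (d.getD (pvFind (pvP n fr) (j : Int)) 0 + PySem.List.pyGetD a (j : Int) 0))
    (fun d (j : Nat) =>
      d.insert (pvFind (pvP n fr) (j : Int))
        (d.getD (pvFind (pvP n fr) (j : Int)) 0 + PySem.List.pyGetD b (j : Int) 0))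
    (List.range n.toNat) PySem.Dict.empty PySem.Dict.empty

theorem pvAlt_eq (n m : Int) (a b : List Int) (fr : List (Int × Int)) :
    can_balance_alt n m a b fr = pvCheck (pvSA n fr a) (pvSA n fr b) (pvSA n fr a).keys := by
  simp only [can_balance_alt]
  rw [pvFold_eq]

theorem pvSA_getD (n : Int) (fr : List (Int × Int)) (c : List Int) (r : Int) :
    (pvSA n fr c).getD r 0 = pvSumC n fr c r := by
  rw [pvSA, pvGroupSum (k := fun (j : Nat) => pvFind (pvP n fr) (j : Int))
    (w := fun (j : Nat) => c.getD j 0)]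
  simp [pvSumC]

theorem pvSA_keys (n : Int) (fr : List (Int × Int)) (c : List Int) (r : Int) :
    r ∈ (pvSA n fr c).keys ↔ ∃ j : Nat, j < n.toNat ∧ pvFind (pvP n fr) (j : Int) = r := by
  rw [pvSA, PySem.Dict.keys_foldl_insert_key _ (fun (j : Nat) => pvFind (pvP n fr) (j : Int))]
  rw [PySem.Set.mem_update]
  simp only [PySem.Dict.keys_empty, List.not_mem_nil, false_or, List.mem_map, List.mem_range]

theorem pvAlt_spec (n m : Int) (a b : List Int) (fr : List (Int × Int)) :
    (can_balance_alt n m a b fr = "No" ↔ ∃ j : Nat, j < n.toNat ∧ pvBad n fr a b j) ∧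
    (can_balance_alt n m a b fr = "Yes" ∨ can_balance_alt n m a b fr = "No") := by
  rw [pvAlt_eq]
  obtain ⟨h1, h2⟩ := pvCheck_no (pvSA n fr a) (pvSA n fr b) (pvSA n fr a).keys
  refine ⟨?_, h2⟩
  rw [h1]
  constructor
  · rintro ⟨k, hk, hne⟩
    obtain ⟨j, hj, rfl⟩ := (pvSA_keys n fr a k).mp hk
    exact ⟨j, hj, by rwa [pvSA_getD, pvSA_getD] at hne⟩
  · rintro ⟨j, hj, hbad⟩
    exact ⟨pvFind (pvP n fr) (j : Int), (pvSA_keys n fr a _).mpr ⟨j, hj, rfl⟩,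
      by rwa [pvSA_getD, pvSA_getD]⟩


-- ---------- A-side: adjacency lists of the built graph ----------

theorem pvBuildGraph_getD_aux (fr : List (Int × Int)) (g0 : PySem.Dict Int (List Int)) (u : Int) :
    (fr.foldl (fun g e =>
      let g1 := g.insert (e.1 - 1) (g.getD (e.1 - 1) [] ++ [e.2 - 1])
      g1.insert (e.2 - 1) (g1.getD (e.2 - 1) [] ++ [e.1 - 1])) g0).getD u []
    = g0.getD u [] ++ fr.flatMap (fun e =>
        (if e.1 - 1 = u then [e.2 - 1] else []) ++ (if e.2 - 1 = u then [e.1 - 1] else [])) := by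
  induction fr generalizing g0 with
  | nil => simp
  | cons e t ih =>
    rw [List.foldl_cons, List.flatMap_cons]
    simp only [ih]
    have hstep : ((g0.insert (e.1 - 1) (g0.getD (e.1 - 1) [] ++ [e.2 - 1])).insert (e.2 - 1)
          ((g0.insert (e.1 - 1) (g0.getD (e.1 - 1) [] ++ [e.2 - 1])).getD (e.2 - 1) []
            ++ [e.1 - 1])).getD u []
        = g0.getD u [] ++ ((if e.1 - 1 = u then [e.2 - 1] else [])
            ++ (if e.2 - 1 = u then [e.1 - 1] else [])) := by
      simp only [PySem.Dict.getD_insert]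
      by_cases h2 : u = e.2 - 1
      · by_cases h12 : e.2 - 1 = e.1 - 1
        · rw [if_pos h2, if_pos h12, if_pos (by omega : e.1 - 1 = u),
            if_pos (by omega : e.2 - 1 = u), show e.1 - 1 = u by omega,
            show e.2 - 1 = u by omega, List.append_assoc]
        · rw [if_pos h2, if_neg h12, if_neg (by omega : ¬(e.1 - 1 = u)),
            if_pos (by omega : e.2 - 1 = u), show e.2 - 1 = u by omega]
          simp
      · rw [if_neg h2]
        by_cases h1 : u = e.1 - 1
        · rw [if_pos h1, if_pos (by omega : e.1 - 1 = u),
            if_neg (by omega : ¬(e.2 - 1 = u)), show e.1 - 1 = u by omega]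
          simp
        · rw [if_neg h1, if_neg (by omega : ¬(e.1 - 1 = u)),
            if_neg (by omega : ¬(e.2 - 1 = u))]
          simp
    rw [hstep, List.append_assoc]


theorem pvMem_graph (fr : List (Int × Int)) (u w : Int) :
    w ∈ (pvBuildGraph fr).getD u [] ↔
      ∃ e ∈ fr, (e.1 - 1 = u ∧ e.2 - 1 = w) ∨ (e.2 - 1 = u ∧ e.1 - 1 = w) := by
  rw [pvBuildGraph, pvBuildGraph_getD_aux]
  simp only [PySem.Dict.getD_empty, List.nil_append, List.mem_flatMap, List.mem_append]
  constructor
  · rintro ⟨e, he, h | h⟩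
    · split_ifs at h with h1
      · simp at h
        exact ⟨e, he, Or.inl ⟨h1, h.symm⟩⟩
      · simp at h
    · split_ifs at h with h1
      · simp at h
        exact ⟨e, he, Or.inr ⟨h1, h.symm⟩⟩
      · simp at h
  · rintro ⟨e, he, ⟨h1, h2⟩ | ⟨h1, h2⟩⟩
    · exact ⟨e, he, Or.inl (by simp [h1, h2])⟩
    · exact ⟨e, he, Or.inr (by simp [h1, h2])⟩

theorem pvGraph_val (n : Int) (fr : List (Int × Int)) (hge : pvGE n fr) (u : Nat)
    (hu : u < n.toNat)
    (w : Int) (hw : w ∈ (pvBuildGraph fr).getD (u : Int) []) :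
    0 ≤ w ∧ w < n ∧ pvAdj fr u w.toNat := by
  obtain ⟨e, he, ⟨h1, h2⟩ | ⟨h1, h2⟩⟩ := (pvMem_graph fr (u : Int) w).mp hw
  · rcases hge e he with he2 | he2
    · exact ⟨by omega, by omega, ⟨e, he, Or.inl ⟨by omega, by omega⟩⟩⟩
    · exfalso; omega
  · rcases hge e he with he2 | he2
    · exact ⟨by omega, by omega, ⟨e, he, Or.inr ⟨by omega, by omega⟩⟩⟩
    · exfalso; omega

theorem pvGraph_adj (n : Int) (fr : List (Int × Int)) (hge : pvGE n fr) (u k : Nat)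
    (hu : u < n.toNat) (h : pvAdj fr u k) :
    (k : Int) ∈ (pvBuildGraph fr).getD (u : Int) [] := by
  obtain ⟨e, he, ⟨h1, h2⟩ | ⟨h1, h2⟩⟩ := h
  · rcases hge e he with he2 | he2
    · exact (pvMem_graph fr _ _).mpr ⟨e, he, Or.inl ⟨by omega, by omega⟩⟩
    · exfalso; omega
  · rcases hge e he with he2 | he2
    · exact (pvMem_graph fr _ _).mpr ⟨e, he, Or.inr ⟨by omega, by omega⟩⟩
    · exfalso; omega

-- ---------- A-side: visited-array helpers ----------

def pvVT (vis : List Bool) (j : Nat) : Bool := vis.getD j false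

theorem pvVT_set (vis : List Bool) (k : Nat) (hk : k < vis.length) (j : Nat) :
    pvVT (vis.set k true) j = if j = k then true else pvVT vis j := by
  unfold pvVT
  by_cases hjk : j = k
  · subst hjk
    rw [if_pos rfl, List.getD_eq_getElem?_getD, List.getElem?_set, if_pos rfl, if_pos hk]
    rfl
  · rw [if_neg hjk, List.getD_eq_getElem?_getD, List.getD_eq_getElem?_getD,
      List.getElem?_set, if_neg (fun h => hjk h.symm)]

theorem pvVT_replicate (N j : Nat) : pvVT (List.replicate N false) j = false := by
  unfold pvVT
  rw [List.getD_eq_getElem?_getD, List.getElem?_replicate]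
  split_ifs <;> rfl

theorem pvGetD_VT (vis : List Bool) (x : Int) (hx : 0 ≤ x) :
    PySem.List.pyGetD vis x false = pvVT vis x.toNat := by
  rw [PySem.List.pyGetD, PySem.List.pyGet?_of_nonneg vis hx]
  unfold pvVT
  rw [List.getD_eq_getElem?_getD]

-- ---------- A-side: sums over filtered ranges ----------

theorem pvSumSplit (l : List Nat) (p q : Nat → Bool) (f : Nat → Int)
    (hdisj : ∀ j ∈ l, ¬(p j = true ∧ q j = true)) :
    ((l.filter (fun j => p j || q j)).map f).sum
      = ((l.filter p).map f).sum + ((l.filter q).map f).sum := by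
  induction l with
  | nil => simp
  | cons h t ih =>
    have ht : ∀ j ∈ t, ¬(p j = true ∧ q j = true) := fun j hj => hdisj j (List.mem_cons_of_mem _ hj)
    have hh := hdisj h (List.mem_cons_self ..)
    simp only [List.filter_cons]
    cases hp : p h <;> cases hq : q h <;> simp_all <;> ring

theorem pvSumCongr (l : List Nat) (p q : Nat → Bool) (f : Nat → Int)
    (h : ∀ j ∈ l, p j = q j) :
    ((l.filter p).map f).sum = ((l.filter q).map f).sum := by
  rw [List.filter_congr h]

theorem pvSumSingle (N j : Nat) (hj : j < N) (f : Nat → Int) :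
    (((List.range N).filter (fun k => k == j)).map f).sum = f j := by
  rw [List.filter_beq, List.count_range]
  simp [hj]

theorem pvSumNews (N : Nat) (news : List Int) (hnd : news.Nodup)
    (hmem : ∀ w ∈ news, 0 ≤ w ∧ w < (N : Int)) (f : Nat → Int) :
    (((List.range N).filter (fun (j : Nat) => decide ((j : Int) ∈ news))).map f).sum
      = (news.map (fun x => f x.toNat)).sum := by
  have hperm : ((List.range N).filter (fun (j : Nat) => decide ((j : Int) ∈ news))).Perm
      (news.map Int.toNat) := by
    rw [List.perm_ext_iff_of_nodup
      (List.Nodup.filter _ (List.nodup_range))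
      (List.Nodup.map_on (fun x hx y hy hxy => by
        have := hmem x hx; have := hmem y hy; omega) hnd)]
    intro j
    simp only [List.mem_filter, List.mem_range, decide_eq_true_eq, List.mem_map]
    constructor
    · rintro ⟨hj, hin⟩; exact ⟨(j : Int), hin, by omega⟩
    · rintro ⟨x, hx, rfl⟩
      have := hmem x hx
      refine ⟨by omega, by rwa [show ((x.toNat : Nat) : Int) = x by omega]⟩
  calc (((List.range N).filter (fun (j : Nat) => decide ((j : Int) ∈ news))).map f).sum
      = ((news.map Int.toNat).map f).sum := (hperm.map f).sum_eq
    _ = (news.map (fun x => f x.toNat)).sum := by rw [List.map_map]; rfl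


theorem pvVT_lt (vis : List Bool) (j : Nat) (h : pvVT vis j = true) : j < vis.length := by
  by_contra hge
  unfold pvVT at h
  rw [List.getD_eq_getElem?_getD, List.getElem?_eq_none (by omega)] at h
  exact absurd h (by simp)

theorem pvGetD_nonneg (c : List Int) (x : Int) (hx : 0 ≤ x) :
    PySem.List.pyGetD c x 0 = c.getD x.toNat 0 := by
  rw [PySem.List.pyGetD, PySem.List.pyGet?_of_nonneg c hx, List.getD_eq_getElem?_getD]

-- ---------- A-side: the neighbour loop ----------

theorem pvBfsNb_spec (n : Int) (vis : List Bool) (hlen : vis.length = n.toNat)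
    (q : List Int) (nbrs : List Int) (hnb : ∀ w ∈ nbrs, 0 ≤ w ∧ w < n) :
    ∃ news : List Int,
      (pvBfsNb (vis, q) nbrs).2 = q ++ news ∧
      (pvBfsNb (vis, q) nbrs).1.length = n.toNat ∧
      (∀ w ∈ news, w ∈ nbrs ∧ (0 ≤ w ∧ w < n) ∧ pvVT vis w.toNat = false) ∧
      (∀ j : Nat, j < n.toNat →
        (pvVT (pvBfsNb (vis, q) nbrs).1 j = true ↔ pvVT vis j = true ∨ (j : Int) ∈ news)) ∧
      news.Nodup ∧
      (∀ w ∈ nbrs, pvVT (pvBfsNb (vis, q) nbrs).1 w.toNat = true) := by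
  induction nbrs generalizing vis q with
  | nil =>
    exact ⟨[], by simp [pvBfsNb], by simp [pvBfsNb, hlen], by simp, by simp [pvBfsNb],
      List.nodup_nil, by simp⟩
  | cons nb t ih =>
    have hb := hnb nb (List.mem_cons_self ..)
    have hnt : ∀ w ∈ t, 0 ≤ w ∧ w < n := fun w hw => hnb w (List.mem_cons_of_mem _ hw)
    have hknn : nb.toNat < n.toNat := by omega
    have hklen : nb.toNat < vis.length := by omega
    have hcast : (nb.toNat : Int) = nb := by omega
    rw [show pvBfsNb (vis, q) (nb :: t)
      = pvBfsNb ((fun (s : List Bool × List Int) nb =>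
          match PySem.List.pyGet? s.1 nb with
          | some false => (PySem.List.pySetD s.1 nb true, s.2 ++ [nb])
          | _ => s) (vis, q) nb) t from rfl]
    cases h : PySem.List.pyGet? vis nb with
    | none =>
      exfalso
      rw [PySem.List.pyGet?_eq_none_iff] at h
      apply h
      unfold PySem.Raise.InRange
      omega
    | some v =>
      have hval : vis[nb.toNat]? = some v := by
        rwa [PySem.List.pyGet?_of_nonneg vis hb.1] at h
      have hvt : pvVT vis nb.toNat = v := by
        unfold pvVT
        rw [List.getD_eq_getElem?_getD, hval]
        rfl
      cases v with
      | true =>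
        rw [show (fun (s : List Bool × List Int) nb =>
            match PySem.List.pyGet? s.1 nb with
            | some false => (PySem.List.pySetD s.1 nb true, s.2 ++ [nb])
            | _ => s) (vis, q) nb = (vis, q) from by simp [h]]
        obtain ⟨news, h1, h2, h3, h4, h5, h6⟩ := ih vis hlen q hnt
        refine ⟨news, h1, h2, ?_, h4, h5, ?_⟩
        · intro w hw
          obtain ⟨hm, hb', hf⟩ := h3 w hw
          exact ⟨List.mem_cons_of_mem _ hm, hb', hf⟩
        · intro w hw
          rcases List.mem_cons.mp hw with rfl | hw
          · exact (h4 w.toNat (by omega)).mpr (Or.inl hvt)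
          · exact h6 w hw
      | false =>
        rw [show (fun (s : List Bool × List Int) nb =>
            match PySem.List.pyGet? s.1 nb with
            | some false => (PySem.List.pySetD s.1 nb true, s.2 ++ [nb])
            | _ => s) (vis, q) nb = (PySem.List.pySetD vis nb true, q ++ [nb]) from by simp [h]]
        rw [PySem.List.pySetD_of_nonneg vis true hb.1]
        obtain ⟨news, h1, h2, h3, h4, h5, h6⟩ :=
          ih (vis.set nb.toNat true) (by simp [hlen]) (q ++ [nb]) hnt
        have hset := pvVT_set vis nb.toNat hklen
        refine ⟨nb :: news, ?_, h2, ?_, ?_, ?_, ?_⟩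
        · rw [h1, List.append_assoc]
          rfl
        · intro w hw
          rcases List.mem_cons.mp hw with rfl | hw
          · exact ⟨List.mem_cons_self .., hb, hvt⟩
          · obtain ⟨hwm, hwb, hwf⟩ := h3 w hw
            refine ⟨List.mem_cons_of_mem _ hwm, hwb, ?_⟩
            by_cases hwk : w.toNat = nb.toNat
            · exfalso
              rw [hset w.toNat, if_pos hwk] at hwf
              simp at hwf
            · rw [hset w.toNat, if_neg hwk] at hwf
              exact hwf
        · intro j hj
          rw [h4 j hj, hset j, List.mem_cons]
          by_cases hjk : j = nb.toNat
          · subst hjk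
            rw [if_pos rfl]
            simp [hcast]
          · rw [if_neg hjk]
            have : ¬((j : Int) = nb) := by omega
            simp [this]
        · refine List.Nodup.cons ?_ h5
          intro hmem
          obtain ⟨_, _, hwf⟩ := h3 nb hmem
          rw [hset nb.toNat, if_pos rfl] at hwf
          exact absurd hwf (by simp)
        · intro w hw
          rcases List.mem_cons.mp hw with rfl | hw
          · refine (h4 w.toNat (by omega)).mpr (Or.inl ?_)
            rw [hset w.toNat, if_pos rfl]
          · exact h6 w hw


-- ---------- A-side: the while-queue loop ----------

theorem pvBfs_spec (n : Int) (fr : List (Int × Int)) (hge : pvGE n fr) (a b : List Int)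
    (vis : List Bool) (q : List Int) (s1 s2 : Int) :
    vis.length = n.toNat →
    (∀ x ∈ q, (0 ≤ x ∧ x < n) ∧ pvVT vis x.toNat = true) →
    q.Nodup →
    (∀ j : Nat, j < n.toNat → pvVT vis j = true → (j : Int) ∉ q →
      ∀ k : Nat, pvAdj fr j k → pvVT vis k = true) →
    ((pvBfs (pvBuildGraph fr) a b vis q s1 s2).1.length = n.toNat ∧
     (∀ j : Nat, pvVT vis j = true →
        pvVT (pvBfs (pvBuildGraph fr) a b vis q s1 s2).1 j = true) ∧
     (∀ j : Nat, j < n.toNat → pvVT (pvBfs (pvBuildGraph fr) a b vis q s1 s2).1 j = true →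
        ∀ k : Nat, pvAdj fr j k → pvVT (pvBfs (pvBuildGraph fr) a b vis q s1 s2).1 k = true) ∧
     (∀ j : Nat, j < n.toNat → pvVT (pvBfs (pvBuildGraph fr) a b vis q s1 s2).1 j = true →
        pvVT vis j = true ∨ ∃ x ∈ q, pvConn fr x.toNat j) ∧
     (pvBfs (pvBuildGraph fr) a b vis q s1 s2).2.1
       = s1 + (q.map (fun x => PySem.List.pyGetD a x 0)).sum
         + (((List.range n.toNat).filter (fun j =>
              pvVT (pvBfs (pvBuildGraph fr) a b vis q s1 s2).1 j && !pvVT vis j)).map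
            (fun j => a.getD j 0)).sum ∧
     (pvBfs (pvBuildGraph fr) a b vis q s1 s2).2.2
       = s2 + (q.map (fun x => PySem.List.pyGetD b x 0)).sum
         + (((List.range n.toNat).filter (fun j =>
              pvVT (pvBfs (pvBuildGraph fr) a b vis q s1 s2).1 j && !pvVT vis j)).map
            (fun j => b.getD j 0)).sum) := by
  induction vis, q, s1, s2 using pvBfs.induct (pvBuildGraph fr) a b with
  | case1 vis s1 s2 =>
    intro hlen hq hqd hcl
    simp only [pvBfs]
    have hfil : ∀ j ∈ List.range n.toNat, (pvVT vis j && !pvVT vis j) = false := by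
      intro j _
      cases pvVT vis j <;> rfl
    refine ⟨hlen, fun j h => h, ?_, fun j _ h => Or.inl h, ?_, ?_⟩
    · intro j hj hvt k hadj
      exact hcl j hj hvt (by simp) k hadj
    · rw [List.filter_congr hfil]
      simp
    · rw [List.filter_congr hfil]
      simp
  | case2 vis node rest s1 s2 s1x s2x stx ihx =>
    intro hlen hq hqd hcl
    have hstx : stx = pvBfsNb (vis, rest) ((pvBuildGraph fr).getD node []) := rfl
    have hs1x : s1x = s1 + PySem.List.pyGetD a node 0 := rfl
    have hs2x : s2x = s2 + PySem.List.pyGetD b node 0 := rfl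
    rw [hstx, hs1x, hs2x] at ihx
    have ih := ihx
    clear ihx
    obtain ⟨hnodeb, hnodev⟩ := hq node (List.mem_cons_self ..)
    have hcn : ((node.toNat : Nat) : Int) = node := by omega
    have hnn : node.toNat < n.toNat := by omega
    have hnb : ∀ w ∈ (pvBuildGraph fr).getD node [], 0 ≤ w ∧ w < n := by
      intro w hw
      have := pvGraph_val n fr hge node.toNat hnn w (by rwa [hcn])
      exact ⟨this.1, this.2.1⟩
    have hadjnb : ∀ w ∈ (pvBuildGraph fr).getD node [], pvAdj fr node.toNat w.toNat := by
      intro w hw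
      exact (pvGraph_val n fr hge node.toNat hnn w (by rwa [hcn])).2.2
    obtain ⟨news, hn1, hn2, hn3, hn4, hn5, hn6⟩ :=
      pvBfsNb_spec n vis hlen rest ((pvBuildGraph fr).getD node []) hnb
    set st := pvBfsNb (vis, rest) ((pvBuildGraph fr).getD node []) with hst
    have hrestq : ∀ x ∈ rest, (0 ≤ x ∧ x < n) ∧ pvVT vis x.toNat = true :=
      fun x hx => hq x (List.mem_cons_of_mem _ hx)
    have hnewsb : ∀ w ∈ news, 0 ≤ w ∧ w < n := fun w hw => (hn3 w hw).2.1
    -- hypotheses of the recursive call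
    have hq' : ∀ x ∈ st.2, (0 ≤ x ∧ x < n) ∧ pvVT st.1 x.toNat = true := by
      intro x hx
      rw [hn1] at hx
      rcases List.mem_append.mp hx with hx | hx
      · obtain ⟨hb', hv'⟩ := hrestq x hx
        exact ⟨hb', (hn4 x.toNat (by omega)).mpr (Or.inl hv')⟩
      · obtain ⟨hb'⟩ := hnewsb x hx
        refine ⟨hnewsb x hx, (hn4 x.toNat (by omega)).mpr (Or.inr ?_)⟩
        rw [show ((x.toNat : Nat) : Int) = x by omega]
        exact hx
    have hqd' : st.2.Nodup := by
      rw [hn1, List.nodup_append]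
      refine ⟨List.Nodup.of_cons hqd, hn5, ?_⟩
      intro x hx y hy hxy
      subst hxy
      exact absurd (hrestq x hx).2 (by rw [(hn3 x hy).2.2]; simp)
    have hcl' : ∀ j : Nat, j < n.toNat → pvVT st.1 j = true → (j : Int) ∉ st.2 →
        ∀ k : Nat, pvAdj fr j k → pvVT st.1 k = true := by
      intro j hj hmk hnotin k hadj
      have hkn : k < n.toNat := pvAdj_lt_low n fr hge j k hj hadj
      rw [hn1] at hnotin
      rcases (hn4 j hj).mp hmk with hvis | hnews
      · by_cases hjnode : (j : Int) = node
        · have : ((k : Nat) : Int) ∈ (pvBuildGraph fr).getD node [] := by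
            rw [← hjnode]
            exact pvGraph_adj n fr hge j k hj hadj
          have := hn6 _ this
          rwa [Int.toNat_natCast] at this
        · by_cases hjrest : (j : Int) ∈ rest
          · exact absurd (List.mem_append.mpr (Or.inl hjrest)) hnotin
          · have hnotq : (j : Int) ∉ node :: rest := by
              intro hm
              rcases List.mem_cons.mp hm with hm | hm
              · exact hjnode hm
              · exact hjrest hm
            have := hcl j hj hvis hnotq k hadj
            exact (hn4 k hkn).mpr (Or.inl this)
      · exact absurd (List.mem_append.mpr (Or.inr hnews)) hnotin
    obtain ⟨ic1, ic2, ic3, ic4, ic5, ic6⟩ := ih hn2 hq' hqd' hcl'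
    -- rewrite this call to the recursive one
    simp only [pvBfs]
    rw [← hst]
    set R := pvBfs (pvBuildGraph fr) a b st.1 st.2
      (s1 + PySem.List.pyGetD a node 0) (s2 + PySem.List.pyGetD b node 0) with hR
    have hmono : ∀ j : Nat, pvVT vis j = true → pvVT R.1 j = true := by
      intro j h
      have hj : j < n.toNat := by
        have := pvVT_lt vis j h
        omega
      exact ic2 j ((hn4 j hj).mpr (Or.inl h))
    have hnewsR : ∀ x ∈ news, pvVT R.1 x.toNat = true := by
      intro x hx
      refine ic2 x.toNat ((hn4 x.toNat (by have := hnewsb x hx; omega)).mpr (Or.inr ?_))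
      rw [show ((x.toNat : Nat) : Int) = x by have := hnewsb x hx; omega]
      exact hx
    have hconnnews : ∀ x ∈ news, pvConn fr node.toNat x.toNat := by
      intro x hx
      exact Relation.ReflTransGen.single (hadjnb x (hn3 x hx).1)
    refine ⟨ic1, hmono, ic3, ?_, ?_, ?_⟩
    · -- reachability bound
      intro j hj hR1
      rcases ic4 j hj hR1 with hst1 | ⟨x, hx, hconn⟩
      · rcases (hn4 j hj).mp hst1 with hvis | hnews
        · exact Or.inl hvis
        · refine Or.inr ⟨node, List.mem_cons_self .., ?_⟩
          have := hconnnews _ hnews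
          rwa [Int.toNat_natCast] at this
      · rw [hn1] at hx
        rcases List.mem_append.mp hx with hx | hx
        · exact Or.inr ⟨x, List.mem_cons_of_mem _ hx, hconn⟩
        · exact Or.inr ⟨node, List.mem_cons_self ..,
            Relation.ReflTransGen.trans (hconnnews x hx) hconn⟩
    · -- sum for a
      rw [ic5, hn1]
      have hsplit : (((List.range n.toNat).filter (fun j => pvVT R.1 j && !pvVT vis j)).map
            (fun j => a.getD j 0)).sum
          = (news.map (fun x => PySem.List.pyGetD a x 0)).sum
            + (((List.range n.toNat).filter (fun j => pvVT R.1 j && !pvVT st.1 j)).map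
              (fun j => a.getD j 0)).sum := by
        rw [pvSumCongr (List.range n.toNat) _
          (fun j => (decide ((j : Int) ∈ news)) || (pvVT R.1 j && !pvVT st.1 j))
          (fun j => a.getD j 0) ?_]
        · rw [pvSumSplit _ _ _ _ ?_]
          · congr 1
            rw [pvSumNews n.toNat news hn5 (fun w hw => by have := hnewsb w hw; omega)
              (fun j => a.getD j 0)]
            exact congrArg List.sum
              (List.map_congr_left (fun x hx => (pvGetD_nonneg a x (hnewsb x hx).1).symm))
          · rintro j - ⟨hmem, hrest⟩
            rw [decide_eq_true_eq] at hmem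
            have : pvVT st.1 j = true :=
              (hn4 j (by have := hnewsb _ hmem; omega)).mpr (Or.inr hmem)
            rw [this] at hrest
            simp at hrest
        · intro j hjr
          have hj : j < n.toNat := List.mem_range.mp hjr
          by_cases hmem : (j : Int) ∈ news
          · have hstj : pvVT st.1 j = true := (hn4 j hj).mpr (Or.inr hmem)
            have hRj : pvVT R.1 j = true := ic2 j hstj
            have hvisj : pvVT vis j = false := by
              have := (hn3 _ hmem).2.2
              rwa [Int.toNat_natCast] at this
            simp [hmem, hRj, hvisj]
          · have hstj : pvVT st.1 j = pvVT vis j := by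
              cases hsj : pvVT st.1 j
              · cases hvj : pvVT vis j
                · rfl
                · exact absurd ((hn4 j hj).mpr (Or.inl hvj)) (by rw [hsj]; simp)
              · rcases (hn4 j hj).mp hsj with hvj | hm
                · exact hvj.symm
                · exact absurd hm hmem
            simp [hmem, hstj]
      rw [hsplit]
      simp only [List.map_cons, List.map_append, List.sum_cons, List.sum_append]
      ring
    · -- sum for b
      rw [ic6, hn1]
      have hsplit : (((List.range n.toNat).filter (fun j => pvVT R.1 j && !pvVT vis j)).map
            (fun j => b.getD j 0)).sum
          = (news.map (fun x => PySem.List.pyGetD b x 0)).sum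
            + (((List.range n.toNat).filter (fun j => pvVT R.1 j && !pvVT st.1 j)).map
              (fun j => b.getD j 0)).sum := by
        rw [pvSumCongr (List.range n.toNat) _
          (fun j => (decide ((j : Int) ∈ news)) || (pvVT R.1 j && !pvVT st.1 j))
          (fun j => b.getD j 0) ?_]
        · rw [pvSumSplit _ _ _ _ ?_]
          · congr 1
            rw [pvSumNews n.toNat news hn5 (fun w hw => by have := hnewsb w hw; omega)
              (fun j => b.getD j 0)]
            exact congrArg List.sum
              (List.map_congr_left (fun x hx => (pvGetD_nonneg b x (hnewsb x hx).1).symm))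
          · rintro j - ⟨hmem, hrest⟩
            rw [decide_eq_true_eq] at hmem
            have : pvVT st.1 j = true :=
              (hn4 j (by have := hnewsb _ hmem; omega)).mpr (Or.inr hmem)
            rw [this] at hrest
            simp at hrest
        · intro j hjr
          have hj : j < n.toNat := List.mem_range.mp hjr
          by_cases hmem : (j : Int) ∈ news
          · have hstj : pvVT st.1 j = true := (hn4 j hj).mpr (Or.inr hmem)
            have hRj : pvVT R.1 j = true := ic2 j hstj
            have hvisj : pvVT vis j = false := by
              have := (hn3 _ hmem).2.2
              rwa [Int.toNat_natCast] at this
            simp [hmem, hRj, hvisj]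
          · have hstj : pvVT st.1 j = pvVT vis j := by
              cases hsj : pvVT st.1 j
              · cases hvj : pvVT vis j
                · rfl
                · exact absurd ((hn4 j hj).mpr (Or.inl hvj)) (by rw [hsj]; simp)
              · rcases (hn4 j hj).mp hsj with hvj | hm
                · exact hvj.symm
                · exact absurd hm hmem
            simp [hmem, hstj]
      rw [hsplit]
      simp only [List.map_cons, List.map_append, List.sum_cons, List.sum_append]
      ring


-- ---------- A-side: the outer loop over range(n) ----------

theorem pvVT_conn_closed (n : Int) (fr : List (Int × Int)) (hge : pvGE n fr) (vis : List Bool)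
    (hcl : ∀ j : Nat, j < n.toNat → pvVT vis j = true → ∀ k : Nat, pvAdj fr j k → pvVT vis k = true)
    (j k : Nat) (hjN : j < n.toNat) (hj : pvVT vis j = true) (hc : pvConn fr j k) :
    pvVT vis k = true := by
  induction hc with
  | refl => exact hj
  | tail hprev hadj ihh => exact hcl _ (pvConn_stay n fr hge _ _ hjN hprev) ihh _ hadj

theorem pvOuter_spec (n : Int) (fr : List (Int × Int)) (hge : pvGE n fr) (a b : List Int)
    (hbr : ∀ i j : Nat, i < n.toNat → j < n.toNat →
      (pvFind (pvP n fr) (i : Int) = pvFind (pvP n fr) (j : Int) ↔ pvConn fr i j))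
    (is : List Int) (vis : List Bool) :
    vis.length = n.toNat →
    (∀ x ∈ is, 0 ≤ x ∧ x < n) →
    (∀ j : Nat, j < n.toNat → pvVT vis j = true → ∀ k : Nat, pvAdj fr j k → pvVT vis k = true) →
    ((pvOuter (pvBuildGraph fr) a b is vis = "No" ↔
        ∃ x ∈ is, pvVT vis x.toNat = false ∧ pvBad n fr a b x.toNat) ∧
     (pvOuter (pvBuildGraph fr) a b is vis = "Yes" ∨
      pvOuter (pvBuildGraph fr) a b is vis = "No")) := by
  induction is generalizing vis with
  | nil =>
    intro hlen his hcl
    constructor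
    · simp [pvOuter]
    · exact Or.inl rfl
  | cons i rest ih =>
    intro hlen his hcl
    obtain ⟨hi0, hin⟩ := his i (List.mem_cons_self ..)
    have hcast : ((i.toNat : Nat) : Int) = i := by omega
    have hjN : i.toNat < n.toNat := by omega
    have hguard : PySem.List.pyGetD vis i false = pvVT vis i.toNat := pvGetD_VT vis i hi0
    rw [pvOuter, hguard]
    by_cases hv : pvVT vis i.toNat = true
    · rw [if_pos hv]
      obtain ⟨ih1, ih2⟩ := ih vis hlen (fun x hx => his x (List.mem_cons_of_mem _ hx)) hcl
      refine ⟨?_, ih2⟩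
      rw [ih1]
      constructor
      · rintro ⟨x, hx, hf, hbad⟩
        exact ⟨x, List.mem_cons_of_mem _ hx, hf, hbad⟩
      · rintro ⟨x, hx, hf, hbad⟩
        rcases List.mem_cons.mp hx with rfl | hx
        · exact absurd hv (by rw [hf]; simp)
        · exact ⟨x, hx, hf, hbad⟩
    · rw [if_neg hv]
      have hvisj : pvVT vis i.toNat = false := by
        cases h : pvVT vis i.toNat
        · rfl
        · exact absurd h hv
      rw [PySem.List.pySetD_of_nonneg vis true hi0]
      have hlen1 : (vis.set i.toNat true).length = n.toNat := by simp [hlen]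
      have hset := pvVT_set vis i.toNat (by omega)
      have hmono1 : ∀ k : Nat, pvVT vis k = true → pvVT (vis.set i.toNat true) k = true := by
        intro k hk
        rw [hset k]
        split_ifs <;> simp [hk]
      obtain ⟨c1, c2, c3, c4, c5, c6⟩ :=
        pvBfs_spec n fr hge a b (vis.set i.toNat true) [i] 0 0 hlen1
          (by
            intro x hx
            rcases List.mem_cons.mp hx with rfl | hx
            · exact ⟨⟨hi0, hin⟩, by rw [hset x.toNat, if_pos rfl]⟩
            · exact absurd hx (List.not_mem_nil))
          (by simp)
          (by
            intro jj hjj hmk hnotin k hadj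
            rw [hset jj] at hmk
            split_ifs at hmk with hjji
            · exact absurd (by rw [hjji, hcast]; exact List.mem_cons_self ..) hnotin
            · exact hmono1 k (hcl jj hjj hmk k hadj))
      set r := pvBfs (pvBuildGraph fr) a b (vis.set i.toNat true) [i] 0 0 with hr
      have hRj : pvVT r.1 i.toNat = true := c2 i.toNat (by rw [hset _, if_pos rfl])
      have hconn_vis_false : ∀ k : Nat, pvConn fr i.toNat k → pvVT vis k = false := by
        intro k hc
        have hkN : k < n.toNat := pvConn_stay n fr hge i.toNat k hjN hc
        cases h : pvVT vis k
        · rfl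
        · exact absurd (pvVT_conn_closed n fr hge vis hcl k i.toNat hkN h
            (pvConn_symm fr _ _ hc)) hv
      have hvk_all : ∀ k : Nat, k < n.toNat →
          (pvVT r.1 k = true ↔ pvVT vis k = true ∨ pvConn fr i.toNat k) := by
        intro k hk
        constructor
        · intro hRk
          rcases c4 k hk hRk with h1 | ⟨x, hx, hconn⟩
          · rw [hset k] at h1
            split_ifs at h1 with hki
            · exact Or.inr (hki ▸ Relation.ReflTransGen.refl)
            · exact Or.inl h1
          · rcases List.mem_cons.mp hx with rfl | hx
            · exact Or.inr hconn
            · exact absurd hx (List.not_mem_nil)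
        · intro h
          rcases h with h | h
          · exact c2 k (hmono1 k h)
          · exact pvVT_conn_closed n fr hge r.1 c3 i.toNat k hjN hRj h
      have hpred : ∀ k ∈ List.range n.toNat,
          (pvFind (pvP n fr) (k : Int) == pvFind (pvP n fr) ((i.toNat : Nat) : Int))
            = ((k == i.toNat) || (pvVT r.1 k && !pvVT (vis.set i.toNat true) k)) := by
        intro k hkr
        have hk : k < n.toNat := List.mem_range.mp hkr
        have hiff : pvConn fr i.toNat k ↔
            (pvFind (pvP n fr) (k : Int) = pvFind (pvP n fr) ((i.toNat : Nat) : Int)) := by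
          rw [hbr k i.toNat hk hjN]
          exact ⟨pvConn_symm fr _ _, pvConn_symm fr _ _⟩
        rw [Bool.eq_iff_iff]
        simp only [beq_iff_eq, Bool.or_eq_true, Bool.and_eq_true, Bool.not_eq_true']
        constructor
        · intro hfind
          have hc := hiff.mpr hfind
          by_cases hki : k = i.toNat
          · exact Or.inl hki
          · refine Or.inr ⟨(hvk_all k hk).mpr (Or.inr hc), ?_⟩
            rw [hset k, if_neg hki]
            exact hconn_vis_false k hc
        · intro h
          rcases h with hki | ⟨hRk, hsf⟩
          · subst hki
            exact hiff.mp Relation.ReflTransGen.refl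
          · have hki : k ≠ i.toNat := by
              intro hh
              rw [hset k, if_pos hh] at hsf
              exact absurd hsf (by simp)
            rw [hset k, if_neg hki] at hsf
            rcases (hvk_all k hk).mp hRk with h1 | h1
            · rw [h1] at hsf
              exact absurd hsf (by simp)
            · exact hiff.mp h1
      have hsum : ∀ (c : List Int), (((List.range n.toNat).filter
            (fun (k : Nat) => pvFind (pvP n fr) (k : Int)
              == pvFind (pvP n fr) ((i.toNat : Nat) : Int))).map
            (fun (k : Nat) => c.getD k 0)).sum
          = c.getD i.toNat 0
            + (((List.range n.toNat).filter
                (fun (k : Nat) => pvVT r.1 k && !pvVT (vis.set i.toNat true) k)).map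
              (fun (k : Nat) => c.getD k 0)).sum := by
        intro c
        rw [pvSumCongr _ _ _ _ hpred, pvSumSplit _ _ _ _ ?_]
        · rw [pvSumSingle n.toNat i.toNat hjN]
        · rintro k - ⟨h1, h2⟩
          rw [beq_iff_eq] at h1
          rw [hset k, if_pos h1] at h2
          simp at h2
      have hsum_a : r.2.1 = pvSumC n fr a (pvFind (pvP n fr) ((i.toNat : Nat) : Int)) := by
        rw [c5, pvSumC, hsum a]
        simp [pvGetD_nonneg a i hi0]
      have hsum_b : r.2.2 = pvSumC n fr b (pvFind (pvP n fr) ((i.toNat : Nat) : Int)) := by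
        rw [c6, pvSumC, hsum b]
        simp [pvGetD_nonneg b i hi0]
      by_cases hbad : pvBad n fr a b i.toNat
      · rw [if_pos (by rw [hsum_a, hsum_b]; exact hbad)]
        exact ⟨⟨fun _ => ⟨i, List.mem_cons_self .., hvisj, hbad⟩, fun _ => rfl⟩, Or.inr rfl⟩
      · rw [if_neg (by rw [hsum_a, hsum_b]; exact fun hh => hbad hh)]
        obtain ⟨ih1, ih2⟩ := ih r.1 c1 (fun x hx => his x (List.mem_cons_of_mem _ hx)) c3
        refine ⟨?_, ih2⟩
        rw [ih1]
        constructor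
        · rintro ⟨x, hx, hf, hbadx⟩
          obtain ⟨hx0, hxn⟩ := his x (List.mem_cons_of_mem _ hx)
          have hxN : x.toNat < n.toNat := by omega
          refine ⟨x, List.mem_cons_of_mem _ hx, ?_, hbadx⟩
          cases hvx : pvVT vis x.toNat
          · rfl
          · exact absurd ((hvk_all x.toNat hxN).mpr (Or.inl hvx)) (by rw [hf]; simp)
        · rintro ⟨x, hx, hf, hbadx⟩
          rcases List.mem_cons.mp hx with rfl | hx
          · exact absurd hbadx hbad
          · obtain ⟨hx0, hxn⟩ := his x (List.mem_cons_of_mem _ hx)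
            have hxN : x.toNat < n.toNat := by omega
            refine ⟨x, hx, ?_, hbadx⟩
            cases hrx : pvVT r.1 x.toNat
            · rfl
            · exfalso
              rcases (hvk_all x.toNat hxN).mp hrx with h1 | h1
              · rw [h1] at hf
                exact absurd hf (by simp)
              · have hEq : pvFind (pvP n fr) ((x.toNat : Nat) : Int)
                    = pvFind (pvP n fr) ((i.toNat : Nat) : Int) :=
                  (hbr x.toNat i.toNat hxN hjN).mpr (pvConn_symm fr _ _ h1)
                apply hbadx
                show pvSumC n fr a _ = pvSumC n fr b _
                rw [hEq]
                exact of_not_not hbad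


theorem pvEx_bridge (n : Int) (fr : List (Int × Int)) (a b : List Int) :
    (∃ x ∈ PySem.List.pyRange 0 n 1,
        pvVT (List.replicate n.toNat false) x.toNat = false ∧ pvBad n fr a b x.toNat) ↔
      (∃ j : Nat, j < n.toNat ∧ pvBad n fr a b j) := by
  constructor
  · rintro ⟨x, hx, -, hbad⟩
    obtain ⟨h0, h1⟩ := PySem.List.mem_pyRange_one.mp hx
    exact ⟨x.toNat, by omega, hbad⟩
  · rintro ⟨j, hj, hbad⟩
    refine ⟨(j : Int), PySem.List.mem_pyRange_one.mpr ⟨by omega, by omega⟩,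
      pvVT_replicate .., ?_⟩
    rw [show ((j : Int)).toNat = j by omega]
    exact hbad

-- ===== VERDICT (by name: the statement is the Claim_ definition above) =====
theorem can_balance_spec : Claim_equal_can_balance := by
  intro n m a b fr hdom hpre
  unfold Spec_can_balance
  obtain ⟨ha, hb2, hrest⟩ := hpre
  by_cases hn0 : n ≤ 0
  · have hrange : PySem.List.pyRange 0 n 1 = [] := by
      have hlr := PySem.List.length_pyRange_one 0 n
      exact List.eq_nil_of_length_eq_zero (by omega)
    rw [show can_balance n m a b fr = "Yes" from by
        simp only [can_balance, hrange]
        rfl,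
      show can_balance_alt n m a b fr = "Yes" from by
        simp only [can_balance_alt, hrange]
        rfl]
  have hn : 0 < n := by omega
  have hge' : pvGE n fr := by
    rcases hrest with h | h
    · exact absurd h hn0
    · exact h
  have hbr : ∀ i j : Nat, i < n.toNat → j < n.toNat →
      (pvFind (pvP n fr) (i : Int) = pvFind (pvP n fr) (j : Int) ↔ pvConn fr i j) :=
    (pvDsu_main n fr hge' hn).2.2
  have hA := pvOuter_spec n fr hge' a b hbr (PySem.List.pyRange 0 n 1)
      (List.replicate n.toNat false)
      (by simp)
      (fun x hx => PySem.List.mem_pyRange_one.mp hx)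
      (by
        intro j hj hvt k hadj
        rw [pvVT_replicate] at hvt
        exact absurd hvt (by simp))
  have hAeq : can_balance n m a b fr
      = pvOuter (pvBuildGraph fr) a b (PySem.List.pyRange 0 n 1)
        (List.replicate n.toNat false) := rfl
  have hB := pvAlt_spec n m a b fr
  have hiff : (can_balance n m a b fr = "No") ↔ (can_balance_alt n m a b fr = "No") := by
    rw [hAeq]
    exact hA.1.trans ((pvEx_bridge n fr a b).trans hB.1.symm)
  rw [hAeq] at hiff ⊢
  rcases hA.2 with hy | hn
  · rcases hB.2 with hby | hbn
    · rw [hy, hby]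
    · exact absurd (hiff.mpr hbn) (by rw [hy]; decide)
  · rw [hn, hiff.mp hn]
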